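-- pv_equiv track=rewrite | github.com/EmmettJT/procedural_replay_paper_2026 | preprocessing/Utilities/utils.py | return_inds_for_seq_groups
-- ===== SOURCE A (Python) =====
-- def return_inds_for_seq_groups(lst):
--     groups = []
--     new = True
--     for ind,item in enumerate(lst):
--         if new:
--             if item > 0:
--                 start = ind
--                 new = False
--         else:
--             if item == 0:
--                 end = ind-1
--                 groups.append((start, end))
--                 new = True
--     return groups
-- ===== SOURCE B (Python) =====
-- def return_inds_for_seq_groups(lst):
--     # Divide and conquer on the first zero: the segment before it contributes a
--     # group iff it contains a strictly positive value (starting there), and the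
--     # rest is handled recursively with shifted indices. A trailing zero-free
--     # tail never reaches a recursive call with a zero, so unclosed runs drop out.
--     try:
--         z = lst.index(0)
--     except ValueError:
--         return []
--     first = next((j for j, v in enumerate(lst[:z]) if v > 0), None)
--     head = [(first, z - 1)] if first is not None else []
--     return head + [(s + z + 1, e + z + 1) for s, e in return_inds_for_seq_groups(lst[z + 1:])]
-- ===== Notes on version B (the rewrite author's own statement) =====
-- stated objective: alternative
-- what changed: Replaced A's single stateful toggle scan (new/start flags) by a divide-and-conquer on the first zero: take the segment before it, emit its first strictly-positive index as a group ending just before the zero, and recurse on the remainder with shifted indices.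
import Mathlib
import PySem

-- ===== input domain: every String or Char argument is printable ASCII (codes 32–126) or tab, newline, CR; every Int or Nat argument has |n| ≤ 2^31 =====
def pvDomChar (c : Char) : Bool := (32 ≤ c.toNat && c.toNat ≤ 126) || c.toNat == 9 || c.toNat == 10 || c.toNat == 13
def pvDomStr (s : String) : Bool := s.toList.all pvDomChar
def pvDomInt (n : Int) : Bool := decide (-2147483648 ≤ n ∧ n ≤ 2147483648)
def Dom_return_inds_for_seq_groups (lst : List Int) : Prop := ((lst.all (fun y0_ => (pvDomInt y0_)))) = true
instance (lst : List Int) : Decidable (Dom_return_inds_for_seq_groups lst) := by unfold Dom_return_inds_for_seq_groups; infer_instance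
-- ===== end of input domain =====

-- B replaces A's stateful toggle scan by a divide-and-conquer on the first zero
-- (segment before it contributes its first strictly-positive index, recurse on the
-- rest with shifted indices); objective: alternative decomposition, same cost.

-- ===== PORT A =====
def return_inds_for_seq_groups (lst : List Int) : List (Int × Int) :=
  ((PySem.List.enumerate lst 0).foldl
    (fun (st : List (Int × Int) × Bool × Int) p =>
      if st.2.1 then
        if p.2 > 0 then (st.1, false, p.1) else st
      else
        if p.2 = 0 then (st.1 ++ [(st.2.2, p.1 - 1)], true, st.2.2) else st)
    ([], true, 0)).1

-- ===== PORT B =====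
def return_inds_for_seq_groups_alt (lst : List Int) : List (Int × Int) :=
  match h : PySem.List.index? lst 0 with
  | none => []
  | some z =>
    let first := ((PySem.List.enumerate (lst.take z) 0).find? (fun p => decide (p.2 > 0))).map Prod.fst
    let head := match first with
      | some f => [(f, (z : Int) - 1)]
      | none => []
    head ++ (return_inds_for_seq_groups_alt (lst.drop (z + 1))).map
      (fun p => (p.1 + (z : Int) + 1, p.2 + (z : Int) + 1))
termination_by lst.length
decreasing_by
  obtain ⟨hk, -⟩ := PySem.List.getElem_of_index?_eq_some h
  simp only [List.length_drop]; omega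

-- ===== PRECONDITION & SPEC =====
def Spec_return_inds_for_seq_groups (lst : List Int) (out : List (Int × Int)) : Prop := out = return_inds_for_seq_groups_alt lst
instance (lst : List Int) (out : List (Int × Int)) : Decidable (Spec_return_inds_for_seq_groups lst out) := by unfold Spec_return_inds_for_seq_groups; infer_instance

-- ===== CLAIM (what is proved, stated in full; the proofs are below) =====
def Claim_equal_return_inds_for_seq_groups : Prop := ∀ (lst : List Int), Dom_return_inds_for_seq_groups lst → Spec_return_inds_for_seq_groups lst (return_inds_for_seq_groups lst)

-- ===== LEMMAS AND PROOFS =====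

-- A's loop written as a structural recursion (index n, flag nw, start st).
def pvALoop (lst : List Int) (n : Int) (nw : Bool) (st : Int) : List (Int × Int) :=
  match lst with
  | [] => []
  | x :: xs =>
    if nw then
      if x > 0 then pvALoop xs (n + 1) false n else pvALoop xs (n + 1) true st
    else
      if x = 0 then (st, n - 1) :: pvALoop xs (n + 1) true st else pvALoop xs (n + 1) false st

theorem pvFold_eq (lst : List Int) : ∀ (n : Int) (g : List (Int × Int)) (nw : Bool) (st : Int),
    ((PySem.List.enumerate lst n).foldl
      (fun (s : List (Int × Int) × Bool × Int) p =>
        if s.2.1 then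
          if p.2 > 0 then (s.1, false, p.1) else s
        else
          if p.2 = 0 then (s.1 ++ [(s.2.2, p.1 - 1)], true, s.2.2) else s)
      (g, nw, st)).1 = g ++ pvALoop lst n nw st := by
  induction lst with
  | nil => intro n g nw st; simp [PySem.List.enumerate_nil, pvALoop]
  | cons x xs ih =>
    intro n g nw st
    rw [PySem.List.enumerate_cons]
    simp only [List.foldl_cons]
    by_cases hnw : nw
    · by_cases hx : x > 0 <;> simp [pvALoop, hnw, hx, ih]
    · by_cases hx : x = 0 <;> simp [pvALoop, hnw, hx, ih]

theorem pvALoop_nozero (lst : List Int) : ∀ (n : Int) (nw : Bool) (st : Int),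
    (0 : Int) ∉ lst → pvALoop lst n nw st = [] := by
  induction lst with
  | nil => intro n nw st _; rfl
  | cons x xs ih =>
    intro n nw st h
    have hx : x ≠ 0 := fun e => h (by simp [e])
    have hxs : (0 : Int) ∉ xs := fun e => h (List.mem_cons_of_mem _ e)
    cases nw <;> simp [pvALoop, hx] <;> try split
    all_goals exact ih _ _ _ hxs

-- In the "new" state the carried start value is never read.
theorem pvALoop_st_irrel (lst : List Int) : ∀ (n st st' : Int),
    pvALoop lst n true st = pvALoop lst n true st' := by
  induction lst with
  | nil => intro n st st'; rfl
  | cons x xs ih =>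
    intro n st st'
    by_cases hx : x > 0
    · simp [pvALoop, hx]
    · simp only [pvALoop, if_neg hx, if_true]
      exact ih _ _ _

-- Crossing a zero-free block in the closed ("false") state emits the group at its end.
theorem pvALoop_false (xs : List Int) : ∀ (n st : Int) (rest : List Int), (0 : Int) ∉ xs →
    pvALoop (xs ++ 0 :: rest) n false st
      = (st, n + xs.length - 1) :: pvALoop rest (n + xs.length + 1) true st := by
  induction xs with
  | nil => intro n st rest _; simp [pvALoop]
  | cons y ys ih =>
    intro n st rest h
    have hy : y ≠ 0 := fun e => h (by simp [e])
    have hys : (0 : Int) ∉ ys := fun e => h (List.mem_cons_of_mem _ e)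
    simp only [List.cons_append, pvALoop, if_neg hy]
    rw [ih (n+1) st rest hys]
    simp only [List.length_cons]
    push_cast
    have e1 : n + 1 + (ys.length : Int) - 1 = n + ((ys.length : Int) + 1) - 1 := by ring
    have e2 : n + 1 + (ys.length : Int) + 1 = n + ((ys.length : Int) + 1) + 1 := by ring
    rw [e1, e2]

-- One segment (up to its closing zero), in terms of the first strictly-positive index.
theorem pvALoop_seg (seg : List Int) : ∀ (n : Int) (rest : List Int), (0 : Int) ∉ seg →
    pvALoop (seg ++ 0 :: rest) n true 0
      = (match seg.findIdx? (fun v => decide (v > 0)) with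
         | some f => [(n + (f : Int), n + (seg.length : Int) - 1)]
         | none => []) ++ pvALoop rest (n + seg.length + 1) true 0 := by
  induction seg with
  | nil =>
    intro n rest _
    simp [pvALoop, List.findIdx?_nil]
  | cons x xs ih =>
    intro n rest h
    have hx : x ≠ 0 := fun e => h (by simp [e])
    have hxs : (0 : Int) ∉ xs := fun e => h (List.mem_cons_of_mem _ e)
    by_cases hp : x > 0
    · simp only [List.cons_append, pvALoop, if_pos hp, if_true]
      rw [pvALoop_false xs (n+1) n rest hxs, pvALoop_st_irrel rest (n+1+xs.length+1) n 0]
      simp [List.findIdx?_cons, hp]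
      refine ⟨by ring, by congr 1; ring⟩
    · simp only [List.cons_append, pvALoop, if_neg hp, if_true]
      rw [ih (n+1) rest hxs]
      simp [List.findIdx?_cons, hp]
      cases hf : xs.findIdx? (fun v => decide (v > 0)) <;> simp [hf]
      · congr 1; push_cast; ring
      · refine ⟨⟨by push_cast; ring, by push_cast; ring⟩, by congr 1; push_cast; ring⟩

-- bridge: B's find? over enumerate is findIdx?
theorem pvEnumFind (seg : List Int) : ∀ (m : Int),
    ((PySem.List.enumerate seg m).find? (fun p => decide (p.2 > 0))).map Prod.fst
      = (seg.findIdx? (fun v => decide (v > 0))).map (fun k => m + (k : Int)) := by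
  induction seg with
  | nil => intro m; simp [PySem.List.enumerate_nil, List.findIdx?_nil]
  | cons x xs ih =>
    intro m
    rw [PySem.List.enumerate_cons]
    by_cases hp : x > 0
    · simp [List.find?_cons, List.findIdx?_cons, hp]
    · simp only [List.find?_cons, List.findIdx?_cons, decide_eq_true_eq, if_neg hp,
        decide_eq_false hp]
      rw [ih]
      cases hf : xs.findIdx? (fun v => decide (v > 0)) <;> simp [hf] <;> push_cast <;> ring

theorem pvMain (N : Nat) : ∀ (lst : List Int), lst.length ≤ N → ∀ (n : Int),
    pvALoop lst n true 0
      = (return_inds_for_seq_groups_alt lst).map (fun p => (p.1 + n, p.2 + n)) := by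
  induction N with
  | zero =>
    intro lst hl n
    have : lst = [] := List.eq_nil_of_length_eq_zero (Nat.le_zero.mp hl)
    subst this
    simp [pvALoop, return_inds_for_seq_groups_alt]
  | succ N ih =>
    intro lst hl n
    rw [return_inds_for_seq_groups_alt]
    split
    case _ heq =>
      have h0 : (0 : Int) ∉ lst := (PySem.List.index?_eq_none_iff _ _).mp heq
      simp [pvALoop_nozero lst n true 0 h0]
    case _ z heq =>
      obtain ⟨seg, rest, hcat, hlen, hnot⟩ := (PySem.List.index?_eq_some_iff _ _ _).mp heq
      subst hlen
      subst hcat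
      have htake : (seg ++ 0 :: rest).take seg.length = seg := by
        simpa using List.take_left seg (0 :: rest)
      have hdrop : (seg ++ 0 :: rest).drop (seg.length + 1) = rest := by
        have h1 : seg.drop (seg.length + 1) = [] := List.drop_eq_nil_of_le (by omega)
        simp [List.drop_append, h1]
      have hrest : rest.length ≤ N := by simp at hl; omega
      rw [htake, hdrop, pvEnumFind seg 0, pvALoop_seg seg n rest hnot, ih rest hrest]
      rw [List.map_append, List.map_map]
      congr 1
      · cases hf : seg.findIdx? (fun v => decide (v > 0)) <;> simp [hf]
        constructor <;> push_cast <;> ring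
      · congr 1
        funext p
        simp
        constructor <;> push_cast <;> ring
-- ===== VERDICT (by name: the statement is the Claim_ definition above) =====
theorem return_inds_for_seq_groups_spec : Claim_equal_return_inds_for_seq_groups := by
  intro lst _
  unfold Spec_return_inds_for_seq_groups return_inds_for_seq_groups
  rw [pvFold_eq lst 0 [] true 0, pvMain lst.length lst le_rfl 0]
  simp
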